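-- pv_equiv track=rewrite | github.com/thap2331/hybrid_search_with_recency | Utils/utils.py | break_into_less_than_512_tokens
-- ===== SOURCE A (Python) =====
-- def break_into_less_than_512_tokens(article):
--     sentences = []
--     count = 0
--     partial_sentence = ''
--
--     for sentence in article.split('.'):
--         if sentence.strip():
--             count += 1
--             partial_sentence += sentence.strip() + '.'
--             if count == 15:
--                 sentences.append(partial_sentence)
--                 partial_sentence = ''
--                 count = 0
--
--     if partial_sentence:
--         sentences.append(partial_sentence)
--
--     return sentences
-- ===== SOURCE B (Python) =====
-- def break_into_less_than_512_tokens(article):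
--     cleaned = [s.strip() for s in article.split('.') if s.strip()]
--     chunks = []
--     while cleaned:
--         chunks.append(''.join(s + '.' for s in cleaned[:15]))
--         cleaned = cleaned[15:]
--     return chunks
-- ===== Notes on version B (the rewrite author's own statement) =====
-- stated objective: simpler
-- what changed: Replaces the running count/partial-buffer flush-every-15 state machine with a filter-then-slice decomposition: first build the flat list of cleaned sentences, then form each chunk by slicing 15 at a time and joining.
import Mathlib
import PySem

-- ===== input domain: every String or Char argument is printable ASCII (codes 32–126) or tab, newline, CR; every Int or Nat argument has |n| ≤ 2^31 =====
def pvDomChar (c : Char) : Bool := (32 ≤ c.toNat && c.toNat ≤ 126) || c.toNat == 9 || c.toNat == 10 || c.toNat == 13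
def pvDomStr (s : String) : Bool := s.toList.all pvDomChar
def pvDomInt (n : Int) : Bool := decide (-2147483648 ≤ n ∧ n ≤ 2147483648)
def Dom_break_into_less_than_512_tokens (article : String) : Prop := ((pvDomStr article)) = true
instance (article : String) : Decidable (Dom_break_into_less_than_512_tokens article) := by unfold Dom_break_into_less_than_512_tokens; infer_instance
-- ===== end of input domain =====

-- B replaces A's running count/partial-buffer flush-every-15 state machine by a
-- filter-then-slice decomposition (clean all sentences first, then chunk by slicing 15 at a time).


-- ===== PORT A =====
-- the loop body of A's for-loop (state = (sentences, count, partial_sentence))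
def pvStepA (st : List String × Nat × String) (sentence : String) : List String × Nat × String :=
  let (sentences, count, partial_) := st
  if PySem.Str.strip sentence ≠ "" then
    let count := count + 1
    let partial_ := partial_ ++ PySem.Str.strip sentence ++ "."
    if count = 15 then (sentences ++ [partial_], 0, "")
    else (sentences, count, partial_)
  else (sentences, count, partial_)

def break_into_less_than_512_tokens (article : String) : List String :=
  -- article.split('.'): sep "." is nonempty, so split? is always `some`; getD [] is never the default
  let r := ((PySem.Str.split? article ".").getD []).foldl pvStepA ([], 0, "")
  if r.2.2 ≠ "" then r.1 ++ [r.2.2] else r.1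

-- ===== PORT B =====
-- cleaned = [s.strip() for s in article.split('.') if s.strip()]
def pvCleaned (pieces : List String) : List String :=
  pieces.filterMap (fun s => if PySem.Str.strip s ≠ "" then some (PySem.Str.strip s) else none)

-- while cleaned: chunks.append(''.join(s + '.' for s in cleaned[:15])); cleaned = cleaned[15:]
def pvChunksLoop (cleaned : List String) (chunks : List String) : List String :=
  if h : cleaned = [] then chunks
  else
    pvChunksLoop (PySem.List.slice cleaned (some 15) none)
      (chunks ++ [PySem.Str.join "" ((PySem.List.slice cleaned none (some 15)).map (fun s => s ++ "."))])
termination_by cleaned.length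
decreasing_by
  rw [PySem.List.slice_from cleaned (by norm_num : (0:Int) ≤ 15)]
  have : cleaned.length ≠ 0 := fun hh => h (List.eq_nil_of_length_eq_zero hh)
  simp only [List.length_drop]
  omega

def break_into_less_than_512_tokens_alt (article : String) : List String :=
  pvChunksLoop (pvCleaned ((PySem.Str.split? article ".").getD [])) []

-- ===== PRECONDITION & SPEC =====
def Spec_break_into_less_than_512_tokens (article : String) (out : List String) : Prop := out = break_into_less_than_512_tokens_alt article
instance (article : String) (out : List String) : Decidable (Spec_break_into_less_than_512_tokens article out) := by unfold Spec_break_into_less_than_512_tokens; infer_instance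

-- ===== CLAIM (what is proved, stated in full; the proofs are below) =====
def Claim_equal_break_into_less_than_512_tokens : Prop := ∀ (article : String), Dom_break_into_less_than_512_tokens article → Spec_break_into_less_than_512_tokens article (break_into_less_than_512_tokens article)

-- ===== LEMMAS AND PROOFS =====

-- proof-side: A's loop body on an already-cleaned (stripped, nonempty) sentence
def pvStep (st : List String × Nat × String) (t : String) : List String × Nat × String :=
  if st.2.1 + 1 = 15 then (st.1 ++ [st.2.2 ++ t ++ "."], 0, "")
  else (st.1, st.2.1 + 1, st.2.2 ++ t ++ ".")

-- proof-side: join a block of cleaned sentences with '.' after each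
def pvJd (l : List String) : String := l.foldl (fun a s => a ++ s ++ ".") ""

-- proof-side: chunking by take/drop
def pvChunksTD (l : List String) : List String :=
  if h : l = [] then []
  else pvJd (l.take 15) :: pvChunksTD (l.drop 15)
termination_by l.length
decreasing_by
  have : l.length ≠ 0 := fun hh => h (List.eq_nil_of_length_eq_zero hh)
  simp only [List.length_drop]; omega

theorem pv_fold_clean (pieces : List String) (st : List String × Nat × String) :
    pieces.foldl pvStepA st = (pvCleaned pieces).foldl pvStep st := by
  induction pieces generalizing st with
  | nil => simp [pvCleaned]
  | cons s rest ih =>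
    by_cases hs : PySem.Str.strip s = ""
    · rw [List.foldl_cons]
      have h1 : pvStepA st s = st := by
        obtain ⟨a, c, p⟩ := st; simp [pvStepA, hs]
      have h2 : pvCleaned (s :: rest) = pvCleaned rest := by
        unfold pvCleaned; rw [List.filterMap_cons]; simp [hs]
      rw [h1, ih, h2]
    · rw [List.foldl_cons, ih]
      have h2 : pvCleaned (s :: rest) = PySem.Str.strip s :: pvCleaned rest := by
        unfold pvCleaned; rw [List.filterMap_cons]; simp [hs]
      rw [h2, List.foldl_cons]
      congr 1
      obtain ⟨a, c, p⟩ := st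
      simp [pvStepA, pvStep, hs]

theorem pv_jd_prefix (l : List String) (a : String) :
    l.foldl (fun a s => a ++ s ++ ".") a = a ++ pvJd l := by
  induction l generalizing a with
  | nil => simp [pvJd]
  | cons s rest ih =>
    simp only [pvJd, List.foldl_cons] at *
    rw [ih, ih ("" ++ s ++ ".")]
    simp [String.append_assoc]

theorem pv_jd_cons (s : String) (l : List String) :
    pvJd (s :: l) = (s ++ ".") ++ pvJd l := by
  have h := pv_jd_prefix l ("" ++ s ++ ".")
  simp only [pvJd, List.foldl_cons]
  rw [h]
  simp [pvJd]

theorem pv_dot_ne (x y : String) : (x ++ ".") ++ y ≠ "" := by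
  intro h
  have := congrArg String.toList h
  simp at this

-- main invariant of A's fold on the cleaned list
theorem pv_fold_run (l : List String) (acc : List String) (c : Nat) (p : String) (hc : c < 15) :
    l.foldl pvStep (acc, c, p) =
      if l.length < 15 - c then (acc, c + l.length, p ++ pvJd l)
      else (l.drop (15 - c)).foldl pvStep (acc ++ [p ++ pvJd (l.take (15 - c))], 0, "") := by
  induction l generalizing acc c p with
  | nil => simp [pvJd]; omega
  | cons s rest ih =>
    by_cases h15 : c + 1 = 15
    · have hc14 : c = 14 := by omega
      subst hc14
      have hdrop : (s :: rest).drop (15 - 14) = rest := by simp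
      have hlen : ¬ ((s :: rest).length < 15 - 14) := by simp
      rw [if_neg hlen, hdrop]
      simp only [List.foldl_cons, pvStep]
      norm_num
      congr 2
      rw [pv_jd_cons]
      simp [pvJd, String.append_assoc]
    · have hc' : c + 1 < 15 := by omega
      simp only [List.foldl_cons, pvStep, if_neg h15]
      rw [ih acc (c + 1) (p ++ s ++ ".") hc']
      have htake : (s :: rest).take (15 - c) = s :: rest.take (15 - (c + 1)) := by
        have h : 15 - c = (15 - (c + 1)) + 1 := by omega
        rw [h]; simp
      have hdrop : (s :: rest).drop (15 - c) = rest.drop (15 - (c + 1)) := by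
        have h : 15 - c = (15 - (c + 1)) + 1 := by omega
        rw [h]; simp
      by_cases hl : rest.length < 15 - (c + 1)
      · rw [if_pos hl, if_pos (by simp only [List.length_cons]; omega)]
        refine congrArg _ ?_
        refine Prod.ext (by simp only [List.length_cons]; omega) ?_
        rw [pv_jd_cons]
        simp [String.append_assoc]
      · rw [if_neg hl, if_neg (by simp only [List.length_cons]; omega), htake, hdrop, pv_jd_cons]
        congr 3
        simp [String.append_assoc]

theorem pv_finalize (l : List String) (acc : List String) :
    (let r := l.foldl pvStep (acc, 0, "");
     if r.2.2 ≠ "" then r.1 ++ [r.2.2] else r.1) = acc ++ pvChunksTD l := by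
  induction hn : l.length using Nat.strong_induction_on generalizing l acc with
  | _ n ih =>
  match l with
  | [] =>
    rw [pvChunksTD, dif_pos rfl]
    simp
  | s :: rest =>
    have hstep : pvStep (acc, 0, "") s = (acc, 1, s ++ ".") := by
      simp [pvStep]
    simp only [List.foldl_cons, hstep]
    rw [pv_fold_run rest acc 1 (s ++ ".") (by omega)]
    rw [pvChunksTD, dif_neg (List.cons_ne_nil s rest)]
    by_cases hl : rest.length < 15 - 1
    · rw [if_pos hl]
      have hne : ((s ++ ".") ++ pvJd rest) ≠ "" := pv_dot_ne s (pvJd rest)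
      have ht : (s :: rest).take 15 = s :: rest := List.take_of_length_le (by simp only [List.length_cons]; omega)
      have hd : (s :: rest).drop 15 = [] := List.drop_eq_nil_of_le (by simp only [List.length_cons]; omega)
      rw [ht, hd, pvChunksTD, dif_pos rfl, pv_jd_cons]
      simp [hne]
    · rw [if_neg hl]
      rw [ih (rest.drop (15 - 1)).length (by subst hn; simp only [List.length_drop, List.length_cons]; omega) (rest.drop (15 - 1)) _ rfl]
      have ht : (s :: rest).take 15 = s :: rest.take 14 := by simp
      have hd : (s :: rest).drop 15 = rest.drop (15 - 1) := by simp
      rw [ht, hd, pv_jd_cons]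
      simp [String.append_assoc]

theorem pv_join_nil_flatten : ∀ (L : List (List Char)), PySem.Chars.join [] L = L.flatten
  | [] => by simp [PySem.Chars.join, List.intercalate]
  | [p] => by simp [PySem.Chars.join, List.intercalate]
  | p :: q :: rest => by
      rw [PySem.Chars.join_cons_cons]
      simp [pv_join_nil_flatten (q :: rest)]

theorem pv_jd_toList : ∀ (l : List String),
    (pvJd l).toList = (l.map (fun s => s.toList ++ ['.'])).flatten
  | [] => by simp [pvJd]
  | s :: rest => by
      rw [pv_jd_cons]
      simp [pv_jd_toList rest]

theorem pv_join_eq_jd (l : List String) :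
    PySem.Str.join "" (l.map (fun s => s ++ ".")) = pvJd l := by
  apply String.toList_inj.mp
  rw [PySem.Str.toList_join, pv_jd_toList]
  simp [pv_join_nil_flatten, Function.comp_def]

theorem pv_loop_eq_td (l chunks : List String) :
    pvChunksLoop l chunks = chunks ++ pvChunksTD l := by
  induction hn : l.length using Nat.strong_induction_on generalizing l chunks with
  | _ n ih =>
  match l with
  | [] => rw [pvChunksLoop, dif_pos rfl, pvChunksTD, dif_pos rfl]; simp
  | s :: rest =>
    rw [pvChunksLoop, dif_neg (List.cons_ne_nil s rest),
        pvChunksTD, dif_neg (List.cons_ne_nil s rest)]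
    rw [PySem.List.slice_from _ (by norm_num : (0:Int) ≤ 15),
        PySem.List.slice_to _ (by norm_num : (0:Int) ≤ 15)]
    simp only [(by decide : (15:Int).toNat = 15)]
    rw [ih ((s :: rest).drop 15).length
          (by subst hn; simp only [List.length_drop, List.length_cons]; omega) _ _ rfl]
    rw [pv_join_eq_jd]
    simp

-- ===== VERDICT (by name: the statement is the Claim_ definition above) =====
theorem break_into_less_than_512_tokens_spec : Claim_equal_break_into_less_than_512_tokens := by
  intro article _
  unfold Spec_break_into_less_than_512_tokens
  unfold break_into_less_than_512_tokens break_into_less_than_512_tokens_alt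
  rw [pv_fold_clean, pv_loop_eq_td]
  simpa using pv_finalize (pvCleaned ((PySem.Str.split? article ".").getD [])) []
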